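-- pv_equiv track=rewrite | github.com/minkenlai/advent_of_code | aoc2023/day/day15/__init__.py | hash_chars
-- ===== SOURCE A (Python) =====
-- def hash_chars(s: str) -> int:
--     v = 0
--     for c in s:
--         if c == "=" or c == "-":
--             break
--         v = v + ord(c)
--         v *= 17
--         v %= 256
--     return v
-- ===== SOURCE B (Python) =====
-- def hash_chars(s: str) -> int:
--     cut = next((i for i, c in enumerate(s) if c == "=" or c == "-"), len(s))
--     return sum(ord(c) * pow(17, cut - i, 256) for i, c in enumerate(s[:cut])) % 256
-- ===== Notes on version B (the rewrite author's own statement) =====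
-- stated objective: alternative
-- what changed: Instead of A's rolling accumulator updated per character with a break, B first locates the cut index of the first terminator character and then evaluates the closed-form weighted sum of ord(c_i)*17^(cut-i) mod 256 using modular exponentiation.
import Mathlib
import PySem

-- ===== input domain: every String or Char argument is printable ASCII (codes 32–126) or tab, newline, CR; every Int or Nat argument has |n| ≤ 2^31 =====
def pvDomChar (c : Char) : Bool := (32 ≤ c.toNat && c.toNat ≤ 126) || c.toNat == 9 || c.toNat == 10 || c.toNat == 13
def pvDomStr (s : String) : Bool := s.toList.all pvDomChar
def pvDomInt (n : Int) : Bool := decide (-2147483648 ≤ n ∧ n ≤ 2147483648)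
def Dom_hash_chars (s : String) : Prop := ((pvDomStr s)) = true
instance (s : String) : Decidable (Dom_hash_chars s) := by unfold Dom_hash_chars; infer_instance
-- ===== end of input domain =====

-- B replaces A's rolling fold by locating the cut index and evaluating the closed-form
-- weighted sum Σ ord(c_i)·17^(cut−i) mod 256; objective: alternative (same O(n) cost).

-- ===== PORT A =====
-- A's for-loop with break: structural recursion carrying the accumulator v.
def hashA_loop (v : Int) : List Char → Int
  | [] => v
  | c :: cs =>
    if c = '=' ∨ c = '-' then v
    else hashA_loop (PySem.Int.mod ((v + (c.toNat : Int)) * 17) 256) cs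

def hash_chars (s : String) : Int := hashA_loop 0 s.toList

-- ===== PORT B =====
-- B: cut = index of first '='/'-' (length if none), then Σ ord(c_i)·pow(17, cut-i, 256) over
-- the enumerated slice s[:cut], taken mod 256.
def hash_chars_alt (s : String) : Int :=
  PySem.Int.mod
    ((PySem.List.enumerate
        (s.toList.take (s.toList.findIdx (fun c => c == '=' || c == '-')))).foldl
      (fun acc p => acc + ((p.2.toNat : Int)) *
        PySem.Int.powMod 17 (s.toList.findIdx (fun c => c == '=' || c == '-') - p.1.toNat) 256) 0)
    256

-- ===== PRECONDITION & SPEC =====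
def Spec_hash_chars (s : String) (out : Int) : Prop := out = hash_chars_alt s
instance (s : String) (out : Int) : Decidable (Spec_hash_chars s out) := by unfold Spec_hash_chars; infer_instance

-- ===== CLAIM (what is proved, stated in full; the proofs are below) =====
def Claim_equal_hash_chars : Prop := ∀ (s : String), Dom_hash_chars s → Spec_hash_chars s (hash_chars s)

-- ===== LEMMAS AND PROOFS =====
-- Python's % with positive modulus is Int.emod.
theorem pymod256 (a : Int) : PySem.Int.mod a 256 = a % 256 := by
  simp [PySem.Int.mod, Int.fmod_eq_emod_of_nonneg]

-- mod 256 absorbs an inner mod 256 under + and *.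
theorem mod_absorb (x k s : Int) : ((x % 256) * k + s) % 256 = (x * k + s) % 256 := by
  conv_lhs => rw [Int.add_emod, Int.mul_emod, Int.emod_emod_of_dvd _ dvd_rfl]
  conv_rhs => rw [Int.add_emod, Int.mul_emod]

theorem mod_absorb' (a c x s : Int) : (a + c * (x % 256) + s) % 256 = (a + c * x + s) % 256 := by
  have h := mod_absorb x c (a + s)
  calc (a + c * (x % 256) + s) % 256 = ((x % 256) * c + (a + s)) % 256 := by ring_nf
    _ = (x * c + (a + s)) % 256 := h
    _ = (a + c * x + s) % 256 := by ring_nf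

-- closed-form weights: wsum [c0,…,ck] = Σ ord(ci)·17^(k+1-i)
def wsum : List Char → Int
  | [] => 0
  | c :: cs => (c.toNat : Int) * 17 ^ (cs.length + 1) + wsum cs

-- A's loop is the fold of the step over the takeWhile prefix.
theorem hashA_loop_eq (l : List Char) : ∀ (v : Int),
    hashA_loop v l =
      (l.takeWhile (fun c => !(c == '=' || c == '-'))).foldl
        (fun v c => PySem.Int.mod ((v + (c.toNat : Int)) * 17) 256) v := by
  induction l with
  | nil => intro v; simp [hashA_loop]
  | cons c cs ih =>
    intro v
    by_cases h : c = '=' ∨ c = '-'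
    · rcases h with h | h <;> subst h <;> simp [hashA_loop]
    · push Not at h
      simp [hashA_loop, h.1, h.2, ih]

-- the fold of A's step from v ∈ [0,256) is the closed form mod 256.
theorem fold_closed (q : List Char) : ∀ (v : Int), 0 ≤ v → v < 256 →
    q.foldl (fun v c => PySem.Int.mod ((v + (c.toNat : Int)) * 17) 256) v
      = (v * 17 ^ q.length + wsum q) % 256 := by
  induction q with
  | nil =>
    intro v h0 h1
    simp [wsum, Int.emod_eq_of_lt h0 h1]
  | cons c cs ih =>
    intro v h0 h1
    have hstep : PySem.Int.mod ((v + (c.toNat : Int)) * 17) 256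
        = ((v + (c.toNat : Int)) * 17) % 256 := pymod256 _
    have h0' : 0 ≤ ((v + (c.toNat : Int)) * 17) % 256 := Int.emod_nonneg _ (by norm_num)
    have h1' : ((v + (c.toNat : Int)) * 17) % 256 < 256 := Int.emod_lt_of_pos _ (by norm_num)
    simp only [List.foldl_cons, hstep]
    rw [ih _ h0' h1', mod_absorb]
    congr 1
    simp [wsum, List.length_cons]
    ring
  
-- take up to findIdx is takeWhile of the negated predicate.
theorem take_findIdx (l : List Char) (p : Char → Bool) :
    l.take (l.findIdx p) = l.takeWhile (fun c => !(p c)) := by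
  induction l with
  | nil => rfl
  | cons c cs ih => by_cases h : p c <;> simp [List.findIdx_cons, h, ih]

-- findIdx is the length of that takeWhile prefix.
theorem findIdx_eq_len (l : List Char) (p : Char → Bool) :
    l.findIdx p = (l.takeWhile (fun c => !(p c))).length := by
  induction l with
  | nil => rfl
  | cons c cs ih => by_cases h : p c <;> simp [List.findIdx_cons, h, ih]

-- B's enumerate-fold mod 256 is wsum mod 256 when the exponents line up.
theorem enumFold_eq (cut : Nat) (q : List Char) : ∀ (j : Nat) (acc : Int),
    j + q.length = cut →
    ((PySem.List.enumerate q (j : Int)).foldl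
        (fun acc p => acc + ((p.2.toNat : Int)) * PySem.Int.powMod 17 (cut - p.1.toNat) 256) acc) % 256
      = (acc + wsum q) % 256 := by
  induction q with
  | nil => intro j acc _; simp [PySem.List.enumerate_nil, wsum]
  | cons c cs ih =>
    intro j acc hj
    simp only [List.length_cons] at hj
    have hcast : ((j : Int) + 1) = ((j + 1 : Nat) : Int) := by push_cast; ring
    have hj' : (j + 1) + cs.length = cut := by omega
    rw [PySem.List.enumerate_cons, List.foldl_cons, hcast, ih (j + 1) _ hj']
    have htn : ((j : Int)).toNat = j := Int.toNat_natCast j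
    have hexp : cut - j = cs.length + 1 := by omega
    rw [htn, hexp]
    have hpow : PySem.Int.powMod 17 (cs.length + 1) 256
        = ((17 : Int) ^ (cs.length + 1)) % 256 := by
      simp [PySem.Int.powMod]
    rw [hpow]
    have := mod_absorb' acc ((c.toNat : Int)) ((17 : Int) ^ (cs.length + 1)) (wsum cs)
    calc (acc + (c.toNat : Int) * ((17:Int) ^ (cs.length + 1) % 256) + wsum cs) % 256
        = (acc + (c.toNat : Int) * (17:Int) ^ (cs.length + 1) + wsum cs) % 256 := this
      _ = (acc + wsum (c :: cs)) % 256 := by simp [wsum]; ring_nf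

-- ===== VERDICT (by name: the statement is the Claim_ definition above) =====
theorem hash_chars_spec : Claim_equal_hash_chars := by
  intro s _
  unfold Spec_hash_chars hash_chars hash_chars_alt
  have htake := take_findIdx s.toList (fun c => c == '=' || c == '-')
  have hcut := findIdx_eq_len s.toList (fun c => c == '=' || c == '-')
  rw [hashA_loop_eq, htake, hcut, pymod256,
    fold_closed _ 0 le_rfl (by norm_num)]
  have h3 := enumFold_eq
    (s.toList.takeWhile (fun c => !(c == '=' || c == '-'))).length
    (s.toList.takeWhile (fun c => !(c == '=' || c == '-'))) 0 0 (by simp)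
  rw [Nat.cast_zero] at h3
  rw [h3]
  simp
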